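-- pv_equiv track=rewrite | github.com/thehalleyyoung/deppy | tests/test_equivalence/test_hard_eq_pairs.py | eq36a
-- ===== SOURCE A (Python) =====
-- def eq36a(d):
--     """Nested comprehension approach."""
--     inv = {}
--     for k in sorted(d.keys()):
--         for v in d[k]:
--             if v not in inv:
--                 inv[v] = []
--             if k not in inv[v]:
--                 inv[v].append(k)
--     return {k: sorted(v) for k, v in sorted(inv.items())}
-- ===== SOURCE B (Python) =====
-- def eq36a(d):
--     """Direct per-value comprehension over the sorted distinct values."""
--     keys = sorted(d)
--     values = sorted({v for vs in d.values() for v in vs})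
--     return {v: [k for k in keys if v in d[k]] for v in values}
-- ===== Notes on version B (the rewrite author's own statement) =====
-- stated objective: simpler
-- what changed: Replaces A's incremental accumulator-dict loop (membership test, list-init, conditional append per occurrence, then a final sort of keys and of every value list) by a direct comprehension: the sorted distinct values, each paired with a single filter of the sorted key list.
import Mathlib
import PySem

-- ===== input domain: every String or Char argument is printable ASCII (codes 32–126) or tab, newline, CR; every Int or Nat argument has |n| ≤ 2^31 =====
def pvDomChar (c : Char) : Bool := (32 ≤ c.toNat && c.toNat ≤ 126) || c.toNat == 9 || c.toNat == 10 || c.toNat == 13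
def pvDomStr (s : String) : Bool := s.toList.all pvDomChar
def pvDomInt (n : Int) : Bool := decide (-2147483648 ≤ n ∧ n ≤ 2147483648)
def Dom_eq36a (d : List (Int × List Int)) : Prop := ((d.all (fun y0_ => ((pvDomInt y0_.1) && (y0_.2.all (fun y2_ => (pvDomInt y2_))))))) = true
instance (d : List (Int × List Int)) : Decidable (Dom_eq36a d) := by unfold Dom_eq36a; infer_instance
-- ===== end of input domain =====

-- B inverts the dict by a direct per-value comprehension (the sorted distinct values, each paired
-- with the sorted keys whose list contains it) instead of A's incremental membership-append loop
-- over an accumulator dict; objective: simpler.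

-- ===== PORT A =====
-- the body of A's inner 'for v in d[k]' loop
def eq36aInner (k : Int) (inv : PySem.Dict Int (List Int)) (v : Int) : PySem.Dict Int (List Int) :=
  let inv := if inv.contains v then inv else inv.insert v []      -- if v not in inv: inv[v] = []
  if (inv.getD v []).contains k then inv                          -- if k not in inv[v]:
  else inv.modify v [] (fun l => l ++ [k])                        --   inv[v].append(k)

-- one iteration of A's outer 'for k in sorted(d.keys())' loop; d[k] is an exact lookup
-- (k is one of dd's keys, so getD with a default never takes the default)
def eq36aStep (dd : PySem.Dict Int (List Int)) (inv : PySem.Dict Int (List Int)) (k : Int) : PySem.Dict Int (List Int) :=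
  (dd.getD k []).foldl (eq36aInner k) inv

def eq36a (d : List (Int × List Int)) : List (Int × List Int) :=
  let dd : PySem.Dict Int (List Int) := PySem.Dict.ofList d
  let inv := (PySem.List.sorted dd.keys (fun x => x) false).foldl (eq36aStep dd) PySem.Dict.empty
  -- sorted(inv.items()): inv's keys are distinct, so Python's tuple comparison only ever
  -- decides on the first component — sorting by it is exact here; the dict comprehension's
  -- keys are those distinct firsts, so its items list is exactly this map
  (PySem.List.sorted inv.items (fun p => p.1) false).map
    (fun p => (p.1, PySem.List.sorted p.2 (fun x => x) false))

-- ===== PORT B =====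
def eq36a_alt (d : List (Int × List Int)) : List (Int × List Int) :=
  let dd : PySem.Dict Int (List Int) := PySem.Dict.ofList d
  let keys := PySem.List.sorted dd.keys (fun x => x) false
  let values := PySem.List.sorted (PySem.Set.ofList (dd.values.flatMap (fun vs => vs))) (fun x => x) false
  -- the dict comprehension's keys (the distinct values) are distinct, so the built dict's
  -- items list is exactly this map; d[k] with k a key of dd is an exact lookup
  values.map (fun v => (v, keys.filter (fun k => (dd.getD k []).contains v)))

-- ===== PRECONDITION & SPEC =====
def Spec_eq36a (d : List (Int × List Int)) (out : List (Int × List Int)) : Prop := out = eq36a_alt d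
instance (d : List (Int × List Int)) (out : List (Int × List Int)) : Decidable (Spec_eq36a d out) := by unfold Spec_eq36a; infer_instance

-- ===== CLAIM (what is proved, stated in full; the proofs are below) =====
def Claim_equal_eq36a : Prop := ∀ (d : List (Int × List Int)), Dom_eq36a d → Spec_eq36a d (eq36a d)

-- ===== LEMMAS AND PROOFS =====

-- one inner step adds v0 to the accumulator's key set
theorem eq36aInner_contains (k v0 v : Int) (inv : PySem.Dict Int (List Int)) :
    (eq36aInner k inv v0).contains v = (inv.contains v || v == v0) := by
  unfold eq36aInner
  by_cases h : inv.contains v0 = true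
  · simp only [h, if_true]
    split_ifs with hk
    · by_cases hv : v = v0 <;> simp [hv, h]
    · by_cases hv : v = v0 <;>
        simp [PySem.Dict.contains_modify, hv, h, Bool.or_comm]
  · simp only [h, Bool.false_eq_true, if_false]
    by_cases hv : v = v0 <;>
      simp [PySem.Dict.getD_insert_self, PySem.Dict.contains_modify,
        PySem.Dict.contains_insert, hv, h, Bool.or_comm]

-- one inner step appends k to inv[v0] unless it is already there
theorem eq36aInner_getD (k v0 v : Int) (inv : PySem.Dict Int (List Int)) :
    (eq36aInner k inv v0).getD v [] =
      inv.getD v [] ++ (if v = v0 ∧ (inv.getD v []).contains k = false then [k] else []) := by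
  unfold eq36aInner
  by_cases h : inv.contains v0 = true
  · simp only [h, if_true]
    by_cases hv : v = v0
    · subst hv
      by_cases hk : k ∈ inv.getD v []
      · simp [hk]
      · simp [hk, PySem.Dict.getD_modify_self]
    · by_cases hk : k ∈ inv.getD v0 []
      · simp [hk, hv]
      · simp [hk, hv, PySem.Dict.getD_modify_of_ne _ _ _ hv]
  · have h0 : inv.getD v0 [] = [] := PySem.Dict.getD_of_not_contains inv [] (by simpa using h)
    simp only [h, Bool.false_eq_true, if_false]
    by_cases hv : v = v0
    · subst hv
      simp [PySem.Dict.getD_insert_self, PySem.Dict.getD_modify_self, h0]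
    · simp [PySem.Dict.getD_insert_self, PySem.Dict.getD_modify_of_ne _ _ _ hv,
        PySem.Dict.getD_insert_of_ne _ _ _ hv, hv]

-- the inner loop over vs appends k to inv[v] exactly when v occurs in vs and k is fresh
theorem eq36aInner_foldl_getD (k v : Int) (vs : List Int) (inv : PySem.Dict Int (List Int)) :
    (vs.foldl (eq36aInner k) inv).getD v [] =
      inv.getD v [] ++ (if v ∈ vs ∧ (inv.getD v []).contains k = false then [k] else []) := by
  induction vs generalizing inv with
  | nil => simp
  | cons v0 vs ih =>
    rw [List.foldl_cons, ih, eq36aInner_getD]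
    by_cases hv : v = v0
    · subst hv
      by_cases hk : k ∈ inv.getD v []
      · simp [hk]
      · simp [hk]
    · by_cases hk : k ∈ inv.getD v [] <;> simp [hv, hk]

theorem eq36aInner_foldl_contains (k v : Int) (vs : List Int) (inv : PySem.Dict Int (List Int)) :
    (vs.foldl (eq36aInner k) inv).contains v = (inv.contains v || vs.contains v) := by
  induction vs generalizing inv with
  | nil => simp
  | cons v0 vs ih =>
    rw [List.foldl_cons, ih, eq36aInner_contains]
    by_cases hv : v = v0
    · simp [hv]
    · have hb : (v == v0) = false := by simpa using hv
      simp [hb, hv]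

theorem eq36aInner_keys_nodup (k v0 : Int) (inv : PySem.Dict Int (List Int))
    (h : inv.keys.Nodup) : (eq36aInner k inv v0).keys.Nodup := by
  unfold eq36aInner
  by_cases hc : inv.contains v0 = true
  · simp only [hc, if_true]
    split_ifs
    · exact h
    · rw [PySem.Dict.keys_modify]
      exact PySem.Dict.nodup_keys_insert _ _ _ h
  · simp only [hc, Bool.false_eq_true, if_false]
    split_ifs
    · exact PySem.Dict.nodup_keys_insert _ _ _ h
    · rw [PySem.Dict.keys_modify]
      exact PySem.Dict.nodup_keys_insert _ _ _ (PySem.Dict.nodup_keys_insert _ _ _ h)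

theorem eq36aInner_foldl_nodup (k : Int) (vs : List Int) (inv : PySem.Dict Int (List Int))
    (h : inv.keys.Nodup) : (vs.foldl (eq36aInner k) inv).keys.Nodup := by
  induction vs generalizing inv with
  | nil => exact h
  | cons v0 vs ih => exact ih _ (eq36aInner_keys_nodup k v0 inv h)

-- the outer loop over distinct keys KS: inv[v] collects, in KS order, the keys whose list has v
theorem eq36aStep_foldl_getD (dd : PySem.Dict Int (List Int)) (v : Int) (KS : List Int) :
    ∀ inv : PySem.Dict Int (List Int), KS.Nodup →
    (∀ k ∈ KS, (inv.getD v []).contains k = false) →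
    (KS.foldl (eq36aStep dd) inv).getD v [] =
      inv.getD v [] ++ KS.filter (fun k => (dd.getD k []).contains v) := by
  induction KS with
  | nil => intro inv _ _; simp
  | cons k KS ih =>
    intro inv hnd h
    rw [List.foldl_cons]
    obtain ⟨hkKS, hndKS⟩ := List.nodup_cons.mp hnd
    have hk : (inv.getD v []).contains k = false := h k (by simp)
    have hstep : (eq36aStep dd inv k).getD v [] =
        inv.getD v [] ++ (if (dd.getD k []).contains v = true then [k] else []) := by
      unfold eq36aStep
      rw [eq36aInner_foldl_getD]
      by_cases hv : v ∈ dd.getD k []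
      · have hknotin : k ∉ inv.getD v [] := by simpa using hk
        simp [hv, hknotin]
      · simp [hv]
    have hnext : ∀ k' ∈ KS, ((eq36aStep dd inv k).getD v []).contains k' = false := by
      intro k' hk'
      have hne : k' ≠ k := fun e => hkKS (e ▸ hk')
      have := h k' (List.mem_cons_of_mem _ hk')
      rw [hstep]
      by_cases hv : (dd.getD k []).contains v = true <;> simp_all
    rw [ih _ hndKS hnext, hstep, List.append_assoc]
    congr 1
    rw [List.filter_cons]
    by_cases hv : v ∈ dd.getD k [] <;> simp [hv]

theorem eq36aStep_foldl_contains (dd : PySem.Dict Int (List Int)) (v : Int) (KS : List Int)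
    (inv : PySem.Dict Int (List Int)) :
    (KS.foldl (eq36aStep dd) inv).contains v =
      (inv.contains v || KS.any (fun k => (dd.getD k []).contains v)) := by
  induction KS generalizing inv with
  | nil => simp
  | cons k KS ih =>
    rw [List.foldl_cons, ih]
    unfold eq36aStep
    rw [eq36aInner_foldl_contains]
    simp [Bool.or_assoc]

theorem eq36aStep_foldl_nodup (dd : PySem.Dict Int (List Int)) (KS : List Int)
    (inv : PySem.Dict Int (List Int)) (h : inv.keys.Nodup) :
    (KS.foldl (eq36aStep dd) inv).keys.Nodup := by
  induction KS generalizing inv with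
  | nil => exact h
  | cons k KS ih => exact ih _ (eq36aInner_foldl_nodup k _ inv h)

theorem pairwise_lt_of_le_nodup (l : List Int) (h1 : l.Pairwise (· ≤ ·)) (h2 : l.Nodup) :
    l.Pairwise (· < ·) := by
  exact (h1.and h2).imp (fun h => lt_of_le_of_ne h.1 h.2)

-- the two bodies agree on any dict with distinct keys
theorem eq36a_core (dd : PySem.Dict Int (List Int)) (hknd : dd.keys.Nodup) :
    (PySem.List.sorted ((PySem.List.sorted dd.keys (fun x => x) false).foldl (eq36aStep dd) PySem.Dict.empty).items (fun p => p.1) false).map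
      (fun p => (p.1, PySem.List.sorted p.2 (fun x => x) false))
    = (PySem.List.sorted (PySem.Set.ofList (dd.values.flatMap (fun vs => vs))) (fun x => x) false).map
      (fun v => (v, (PySem.List.sorted dd.keys (fun x => x) false).filter (fun k => (dd.getD k []).contains v))) := by
  set KS := PySem.List.sorted dd.keys (fun x => x) false with hKSdef
  have hKSperm : KS.Perm dd.keys := PySem.List.sorted_perm dd.keys (fun x => x) false
  have hKSnd : KS.Nodup := hKSperm.nodup_iff.mpr hknd
  have hKSle : KS.Pairwise (· ≤ ·) := PySem.List.sorted_pairwise dd.keys (fun x => x)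
  set invF := KS.foldl (eq36aStep dd) PySem.Dict.empty with hinvF
  have hgetD : ∀ v, invF.getD v [] = KS.filter (fun k => (dd.getD k []).contains v) := by
    intro v
    rw [hinvF, eq36aStep_foldl_getD dd v KS PySem.Dict.empty hKSnd]
    · rw [PySem.Dict.getD_of_not_contains _ _ (PySem.Dict.contains_empty v), List.nil_append]
    · intro k _
      rw [PySem.Dict.getD_of_not_contains _ _ (PySem.Dict.contains_empty v)]
      rfl
  have hcont : ∀ v, invF.contains v = KS.any (fun k => (dd.getD k []).contains v) := by
    intro v
    rw [hinvF, eq36aStep_foldl_contains, PySem.Dict.contains_empty, Bool.false_or]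
  have hinvnd : invF.keys.Nodup := eq36aStep_foldl_nodup dd KS _ PySem.Dict.nodup_keys_empty
  have hitems : invF.items = invF.keys.map (fun v => (v, invF.getD v [])) :=
    PySem.Dict.items_eq_map_keys invF hinvnd []
  set SK := PySem.List.sorted invF.keys (fun x => x) false with hSKdef
  have hSKperm : SK.Perm invF.keys := PySem.List.sorted_perm _ _ _
  have hSKnd : SK.Nodup := hSKperm.nodup_iff.mpr hinvnd
  have hsortitems : PySem.List.sorted invF.items (fun p => p.1) false
      = SK.map (fun v => (v, invF.getD v [])) := by
    apply PySem.List.sorted_eq_of_perm_of_pairwise_lt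
    · rw [hitems]; exact hSKperm.map _
    · rw [List.pairwise_map]
      exact pairwise_lt_of_le_nodup SK (PySem.List.sorted_pairwise _ _) hSKnd
  have hVL : PySem.List.sorted (PySem.Set.ofList (dd.values.flatMap (fun vs => vs))) (fun x => x) false = SK := by
    apply PySem.List.sorted_eq_of_perm_of_pairwise_lt
    · refine hSKperm.trans ((List.perm_ext_iff_of_nodup hinvnd (PySem.Set.nodup_ofList _)).mpr ?_)
      intro v
      rw [← PySem.Dict.contains_iff_mem_keys, hcont, PySem.Set.mem_ofList, List.mem_flatMap,
        PySem.Dict.values_eq_map_keys dd hknd []]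
      simp only [List.any_eq_true, List.mem_map]
      constructor
      · rintro ⟨k, hk, hv⟩
        exact ⟨dd.getD k [], ⟨k, hKSperm.mem_iff.mp hk, rfl⟩, by simpa using hv⟩
      · rintro ⟨vs, ⟨k, hk, rfl⟩, hv⟩
        exact ⟨k, hKSperm.mem_iff.mpr hk, by simpa using hv⟩
    · exact pairwise_lt_of_le_nodup SK (PySem.List.sorted_pairwise _ _) hSKnd
  rw [hVL, hsortitems, List.map_map]
  apply List.map_congr_left
  intro v _
  simp only [Function.comp]
  rw [hgetD v]
  rw [PySem.List.sorted_eq_self_of_pairwise _ _ (hKSle.filter _)]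

-- ===== VERDICT (by name: the statement is the Claim_ definition above) =====
theorem eq36a_spec : Claim_equal_eq36a := by
  intro d _
  show eq36a d = eq36a_alt d
  exact eq36a_core (PySem.Dict.ofList d) (PySem.Dict.nodup_keys_ofList d)
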